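-- pv_equiv track=rewrite | github.com/Leo-tumo/IPONWEB | src/homework_1.py | vote_sort
-- ===== SOURCE A (Python) =====
-- def vote_sort(votes):
--     word_len = len(votes[0])
--     d = {k: 0 for (k) in votes[0]}
--     for vote in votes:
--         for letter in range(word_len):
--             d[vote[letter]] += 26 ** (word_len - letter)
--     sorted_values = sorted(d.values(), reverse=True)
--     sorted_keys = sorted(d.keys())
--     s = []
--     for i in sorted_values:
--         for k in sorted_keys:
--             if d[k] == i and k not in s:
--                 s.append(k)
--     return ''.join(s)
-- ===== SOURCE B (Python) =====
-- def vote_sort(votes):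
--     first = votes[0]
--     n = len(first)
--     weights = [26 ** (n - i) for i in range(n)]
--     scores = dict.fromkeys(first, 0)
--     for vote in votes:
--         for w, c in zip(weights, vote):
--             scores[c] += w
--     return ''.join(sorted(scores, key=lambda c: (-scores[c], c)))
-- ===== Notes on version B (the rewrite author's own statement) =====
-- stated objective: simpler
-- what changed: The O(K^2) selection (sort values descending, sort keys, nested re-scan with membership test) is replaced by one composite-key sort (-score, letter); weights are precomputed and votes consumed with zip instead of indexing.
import Mathlib
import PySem

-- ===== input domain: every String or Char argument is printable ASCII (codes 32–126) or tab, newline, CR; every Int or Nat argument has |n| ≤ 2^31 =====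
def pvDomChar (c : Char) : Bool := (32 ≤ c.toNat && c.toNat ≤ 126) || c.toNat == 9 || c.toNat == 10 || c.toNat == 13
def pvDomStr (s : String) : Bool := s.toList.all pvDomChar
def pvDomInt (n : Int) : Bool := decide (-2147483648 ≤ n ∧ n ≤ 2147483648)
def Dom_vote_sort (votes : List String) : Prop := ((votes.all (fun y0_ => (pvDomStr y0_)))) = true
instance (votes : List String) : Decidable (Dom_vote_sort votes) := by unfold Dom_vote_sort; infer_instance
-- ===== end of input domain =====

-- B replaces A's quadratic selection (descending value list re-scanned against the sorted key list
-- with a membership test) by a single composite-key sort on (-score, letter); simpler, same values.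

-- ===== PORT A =====
def vote_sort (votes : List String) : String :=
  let first := ((PySem.List.pyGet? votes 0).getD "").toList
  let word_len := first.length
  let d0 : PySem.Dict Char Int := first.foldl (fun d k => d.insert k 0) PySem.Dict.empty
  let d := votes.foldl (fun d vote =>
      (PySem.List.pyRange 0 (word_len : Int)).foldl (fun d letter =>
        d.modify (PySem.List.pyGetD vote.toList letter ' ') 0
          (fun v => v + 26 ^ ((word_len : Int) - letter).toNat)) d) d0
  let sorted_values := PySem.List.sorted d.values (fun v => v) true
  let sorted_keys := PySem.List.sorted d.keys (fun k => k) false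
  let s := sorted_values.foldl (fun s i =>
      sorted_keys.foldl (fun s k =>
        if (d.getD k 0 == i) && !(s.contains k) then s ++ [k] else s) s) ([] : List Char)
  String.ofList s

-- ===== PORT B =====
def vote_sort_alt (votes : List String) : String :=
  let first := ((PySem.List.pyGet? votes 0).getD "").toList
  let n := first.length
  let weights := (PySem.List.pyRange 0 (n : Int)).map (fun i => (26 : Int) ^ ((n : Int) - i).toNat)
  let scores0 : PySem.Dict Char Int := first.foldl (fun d k => d.insert k 0) PySem.Dict.empty
  let scores := votes.foldl (fun d vote =>
      (weights.zip vote.toList).foldl (fun d wc =>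
        d.modify wc.2 0 (fun v => v + wc.1)) d) scores0
  String.ofList (PySem.List.sorted2 scores.keys (fun c => -(scores.getD c 0)) (fun c => c) false)

-- ===== PRECONDITION & SPEC =====
-- Pre_ excludes exactly the inputs on which A raises: the empty list (IndexError on votes[0]),
-- a vote shorter than votes[0] (IndexError), and a vote whose first len(votes[0]) letters are
-- not all letters of votes[0] (KeyError).
def Pre_vote_sort (votes : List String) : Prop :=
  votes ≠ [] ∧ ∀ v ∈ votes,
    (votes.headD "").toList.length ≤ v.toList.length ∧
    (v.toList.take (votes.headD "").toList.length).all
      (fun c => (votes.headD "").toList.contains c) = true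
instance (votes : List String) : Decidable (Pre_vote_sort votes) := by unfold Pre_vote_sort; infer_instance
def pvWitness_vote_sort : List String := ["ab", "ba", "aa"]

def Spec_vote_sort (votes : List String) (out : String) : Prop := out = vote_sort_alt votes
instance (votes : List String) (out : String) : Decidable (Spec_vote_sort votes out) := by unfold Spec_vote_sort; infer_instance

-- ===== CLAIM (what is proved, stated in full; the proofs are below) =====
def Claim_equal_vote_sort : Prop := ∀ (votes : List String), Dom_vote_sort votes → Pre_vote_sort votes → Spec_vote_sort votes (vote_sort votes)

-- ===== LEMMAS AND PROOFS =====

-- strict "score descending, then letter ascending" order that both final passes produce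
def pvLexLT (score : Char → Int) (a b : Char) : Prop :=
  score b < score a ∨ (score a = score b ∧ a < b)

-- one pass of A's selection over the sorted key list, in closed form
def pvPass (score : Char → Int) (K : List Char) (s : List Char) (i : Int) : List Char :=
  s ++ K.filter (fun k => (score k == i) && !(s.contains k))

-- A's inner scan for one value equals pvPass (needs distinct keys)
theorem pvPass_eq (score : Char → Int) (v : Int) :
    ∀ (K : List Char), K.Nodup → ∀ (s₀ : List Char),
      K.foldl (fun s k => if (score k == v) && !(s.contains k) then s ++ [k] else s) s₀
        = pvPass score K s₀ v := by
  intro K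
  induction K with
  | nil => intro _ s₀; simp [pvPass]
  | cons k K ih =>
    intro hnd s₀
    obtain ⟨hk, hnd'⟩ := List.nodup_cons.mp hnd
    by_cases hc : (score k == v) && !(s₀.contains k)
    · have hfc : List.filter (fun x => score x == v && !((s₀ ++ [k]).contains x)) K
          = List.filter (fun x => score x == v && !(s₀.contains x)) K := by
        apply List.filter_congr
        intro x hx
        have hxk : x ≠ k := fun h => hk (h ▸ hx)
        simp [List.contains_eq_mem, hxk]
      rw [List.foldl_cons, if_pos hc, ih hnd']
      simp only [pvPass, hfc, List.filter_cons, hc, if_true, List.append_assoc]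
      simp
    · simp only [List.foldl_cons, if_neg hc, ih hnd']
      simp only [pvPass, List.filter_cons]
      rw [if_neg hc]

-- membership in A's selection: every key whose score occurs in the value list, once
theorem pvG_mem (score : Char → Int) (K : List Char) :
    ∀ (vs : List Int) (s₀ : List Char) (x : Char),
      x ∈ vs.foldl (pvPass score K) s₀ ↔ x ∈ s₀ ∨ (x ∈ K ∧ score x ∈ vs) := by
  intro vs
  induction vs with
  | nil => simp
  | cons v vs ih =>
    intro s₀ x
    rw [List.foldl_cons, ih]
    simp only [pvPass, List.mem_append, List.mem_filter, Bool.and_eq_true, beq_iff_eq,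
      Bool.not_eq_true', List.contains_eq_mem, decide_eq_false_iff_not, List.mem_cons]
    by_cases hx : x ∈ s₀ <;> by_cases hk : x ∈ K <;> simp [hx, hk]

theorem pvG_nodup (score : Char → Int) (K : List Char) (hK : K.Nodup) :
    ∀ (vs : List Int) (s₀ : List Char), s₀.Nodup → (vs.foldl (pvPass score K) s₀).Nodup := by
  intro vs
  induction vs with
  | nil => intro s₀ h; simpa
  | cons v vs ih =>
    intro s₀ h
    rw [List.foldl_cons]
    apply ih
    simp only [pvPass]
    rw [List.nodup_append]
    refine ⟨h, (hK.filter _), ?_⟩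
    intro x hx b hb
    have := List.of_mem_filter hb
    simp only [Bool.and_eq_true, Bool.not_eq_true', List.contains_eq_mem,
      decide_eq_false_iff_not] at this
    exact fun he => this.2 (he ▸ hx)

-- the selection emits keys in strictly decreasing score / increasing letter order
theorem pvG_pairwise (score : Char → Int) (K : List Char) (hK : K.Pairwise (· < ·)) :
    ∀ (vs : List Int) (s₀ : List Char), vs.Pairwise (fun a b => b ≤ a) →
      s₀.Pairwise (pvLexLT score) →
      (∀ a ∈ s₀, ∀ k ∈ K, k ∉ s₀ → score k ∈ vs → pvLexLT score a k) →
      (vs.foldl (pvPass score K) s₀).Pairwise (pvLexLT score) := by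
  intro vs
  induction vs with
  | nil => intro s₀ _ h1 _; simpa
  | cons v vs ih =>
    intro s₀ hvs h1 h2
    have hvs' := List.pairwise_cons.mp hvs
    rw [List.foldl_cons]
    apply ih _ hvs'.2
    · simp only [pvPass]
      rw [List.pairwise_append]
      refine ⟨h1, ?_, ?_⟩
      · have hblt : (List.filter (fun k => (score k == v) && !(s₀.contains k)) K).Pairwise (· < ·) :=
          hK.sublist (List.filter_sublist)
        apply List.Pairwise.imp_of_mem ?_ hblt
        intro a b ha hb hab
        have pa := List.of_mem_filter ha
        have pb := List.of_mem_filter hb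
        simp only [Bool.and_eq_true, beq_iff_eq] at pa pb
        exact Or.inr ⟨pa.1.trans pb.1.symm, hab⟩
      · intro a ha b hb
        have pb := List.of_mem_filter hb
        simp only [Bool.and_eq_true, beq_iff_eq, Bool.not_eq_true', List.contains_eq_mem,
          decide_eq_false_iff_not] at pb
        exact h2 a ha b (List.mem_of_mem_filter hb) pb.2 (by simp [pb.1])
    · intro a ha k hkK hks hsv
      simp only [pvPass, List.mem_append] at ha hks
      push Not at hks
      rcases ha with ha | ha
      · exact h2 a ha k hkK hks.1 (by simp [hsv])
      · have pa := List.of_mem_filter ha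
        simp only [Bool.and_eq_true, beq_iff_eq] at pa
        have hle : score k ≤ v := hvs'.1 _ hsv
        rcases lt_or_eq_of_le hle with hlt | heq
        · exact Or.inl (by rw [pa.1]; exact hlt)
        · exfalso
          apply hks.2
          apply List.mem_filter.mpr
          refine ⟨hkK, ?_⟩
          simp only [Bool.and_eq_true, beq_iff_eq, Bool.not_eq_true', List.contains_eq_mem,
            decide_eq_false_iff_not]
          exact ⟨heq, hks.1⟩

-- sorted2 with two keys is sorted with the lexicographic product key
theorem pvSorted2_eq_sorted_lex {α κ₁ κ₂ : Type} [LinearOrder κ₁] [LinearOrder κ₂]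
    (xs : List α) (k1 : α → κ₁) (k2 : α → κ₂) :
    PySem.List.sorted2 xs k1 k2 false
      = PySem.List.sorted xs (fun x => toLex (k1 x, k2 x)) false := by
  simp only [PySem.List.sorted2, PySem.List.sorted]
  have hb : (fun (a b : α) => decide (k1 a < k1 b) || (!decide (k1 b < k1 a) && decide (k2 a < k2 b)))
      = (fun a b => decide (toLex (k1 a, k2 a) < toLex (k1 b, k2 b))) := by
    funext a b
    simp only [Prod.Lex.toLex_lt_toLex]
    by_cases h : k1 a < k1 b
    · simp [h]
    · by_cases h' : k1 b < k1 a
      · simp [h, h', ne_of_gt h']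
      · have : k1 a = k1 b := le_antisymm (not_lt.mp h') (not_lt.mp h)
        simp [this]
  simp only [if_neg (by decide : ¬ (false = true))] at *
  rw [hb]

-- A's whole selection block equals B's composite-key sort, for any dict with distinct keys
theorem pvSel_eq (d : PySem.Dict Char Int) (hnd : d.keys.Nodup) :
    (PySem.List.sorted d.values (fun v => v) true).foldl
      (fun s i => (PySem.List.sorted d.keys (fun k => k) false).foldl
        (fun s k => if (d.getD k 0 == i) && !(s.contains k) then s ++ [k] else s) s)
      ([] : List Char)
    = PySem.List.sorted2 d.keys (fun c => -(d.getD c 0)) (fun c => c) false := by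
  set score : Char → Int := fun k => d.getD k 0 with hscore
  set K : List Char := PySem.List.sorted d.keys (fun k => k) false with hKdef
  set vs : List Int := PySem.List.sorted d.values (fun v => v) true with hvsdef
  have hKperm : K.Perm d.keys := PySem.List.sorted_perm d.keys (fun k => k) false
  have hKnd : K.Nodup := hKperm.nodup_iff.mpr hnd
  have hKle : K.Pairwise (fun a b => a ≤ b) := PySem.List.sorted_pairwise d.keys (fun k => k)
  have hKlt : K.Pairwise (· < ·) := (hKle.and hKnd).imp (fun h => lt_of_le_of_ne h.1 h.2)
  have hstep : (fun (s : List Char) (i : Int) => K.foldl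
      (fun s k => if (score k == i) && !(s.contains k) then s ++ [k] else s) s) = pvPass score K := by
    funext s i
    exact pvPass_eq score i K hKnd s
  rw [hstep]
  have hvals : d.values = d.keys.map score := PySem.Dict.values_eq_map_keys d hnd 0
  have hmemv : ∀ k ∈ K, score k ∈ vs := by
    intro k hk
    rw [hvsdef, PySem.List.mem_sorted, hvals]
    exact List.mem_map_of_mem (hKperm.mem_iff.mp hk)
  have hres_nodup := pvG_nodup score K hKnd vs [] (List.nodup_nil)
  have hres_mem : ∀ x, x ∈ vs.foldl (pvPass score K) [] ↔ x ∈ d.keys := by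
    intro x
    rw [pvG_mem]
    simp only [List.not_mem_nil, false_or]
    constructor
    · exact fun h => hKperm.mem_iff.mp h.1
    · intro h
      have hx : x ∈ K := hKperm.mem_iff.mpr h
      exact ⟨hx, hmemv x hx⟩
  have hperm : (vs.foldl (pvPass score K) []).Perm d.keys :=
    (List.perm_ext_iff_of_nodup hres_nodup hnd).mpr hres_mem
  have hpw := pvG_pairwise score K hKlt vs []
    (PySem.List.sorted_pairwise_rev d.values (fun v => v))
    (List.Pairwise.nil) (by simp)
  rw [pvSorted2_eq_sorted_lex]
  refine (PySem.List.sorted_eq_of_perm_of_pairwise_lt d.keys _ _ hperm ?_).symm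
  apply hpw.imp
  intro a b h
  rw [Prod.Lex.toLex_lt_toLex]
  rcases h with h | ⟨h1, h2⟩
  · exact Or.inl (by simpa using h)
  · exact Or.inr ⟨by simpa using h1, h2⟩

-- the two accumulation loops perform the same dict updates (per admitted vote)
theorem pvInner_eq (n : Nat) (cs : List Char) (h : n ≤ cs.length) (d : PySem.Dict Char Int) :
    (PySem.List.pyRange 0 (n : Int)).foldl (fun d letter =>
        d.modify (PySem.List.pyGetD cs letter ' ') 0
          (fun v => v + 26 ^ ((n : Int) - letter).toNat)) d
    = (((PySem.List.pyRange 0 (n : Int)).map (fun i => (26 : Int) ^ ((n : Int) - i).toNat)).zip cs).foldl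
        (fun d wc => d.modify wc.2 0 (fun v => v + wc.1)) d := by
  have hz : (((PySem.List.pyRange 0 (n : Int)).map (fun i => (26 : Int) ^ ((n : Int) - i).toNat)).zip cs)
      = (List.range n).map (fun (j : Nat) => ((26 : Int) ^ ((n : Int) - (j : Int)).toNat, cs.getD j ' ')) := by
    rw [PySem.List.pyRange_zero_natCast, List.map_map]
    apply List.ext_getElem
    · simp [Nat.min_eq_left h]
    · intro i h1 h2
      have hi : i < n := by simpa using h2
      have hic : i < cs.length := lt_of_lt_of_le hi h
      simp [List.getElem_zip, List.getElem?_eq_getElem hic]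
  rw [hz, PySem.List.pyRange_zero_natCast, List.foldl_map, List.foldl_map]
  apply PySem.List.foldl_congr_mem
  intro acc j hj
  have hjn : j < n := List.mem_range.mp hj
  have hjc : j < cs.length := lt_of_lt_of_le hjn h
  simp [PySem.List.pyGetD_natCast, List.getElem?_eq_getElem hjc]

-- B's accumulation keeps the dict keys distinct
theorem pvKeys_nodup (F : List Char) (votes : List String) (ws : List Int) :
    ((votes.foldl (fun d vote =>
        (ws.zip vote.toList).foldl
          (fun d wc => d.modify wc.2 0 (fun v => v + wc.1)) d)
        (F.foldl (fun d k => d.insert k 0) PySem.Dict.empty)).keys).Nodup := by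
  have base : ((F.foldl (fun d k => d.insert k 0) PySem.Dict.empty : PySem.Dict Char Int)).keys.Nodup := by
    apply PySem.Dict.nodup_keys_foldl_insert F (fun _ _ => (0 : Int)) PySem.Dict.empty
    simp [PySem.Dict.keys_empty]
  have gen : ∀ (vs : List String) (d : PySem.Dict Char Int), d.keys.Nodup →
      ((vs.foldl (fun d vote =>
        (ws.zip vote.toList).foldl
          (fun d wc => d.modify wc.2 0 (fun v => v + wc.1)) d) d).keys).Nodup := by
    intro vs
    induction vs with
    | nil => intro d hd; simpa using hd
    | cons v t ih =>
      intro d hd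
      rw [List.foldl_cons]
      exact ih _ (PySem.Dict.nodup_keys_foldl_modify_key (ws.zip v.toList) Prod.snd 0
        (fun d wc => fun x => x + wc.1) d hd)
  exact gen votes _ base

-- ===== VERDICT (by name: the statement is the Claim_ definition above) =====
theorem vote_sort_spec : Claim_equal_vote_sort := by
  intro votes _ hpre
  unfold Spec_vote_sort
  obtain ⟨hne, hall⟩ := hpre
  cases votes with
  | nil => exact absurd rfl hne
  | cons v0 t =>
    have hfirst : (PySem.List.pyGet? (v0 :: t) (0 : Int)).getD "" = v0 := by
      simp [PySem.List.pyGet?, PySem.List.pyIdx?]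
    simp only [vote_sort, vote_sort_alt, hfirst]
    have hd : (v0 :: t).foldl (fun d vote =>
        (PySem.List.pyRange 0 (v0.toList.length : Int)).foldl (fun d letter =>
          d.modify (PySem.List.pyGetD vote.toList letter ' ') 0
            (fun v => v + 26 ^ ((v0.toList.length : Int) - letter).toNat)) d)
        (v0.toList.foldl (fun d k => d.insert k 0) PySem.Dict.empty)
      = (v0 :: t).foldl (fun d vote =>
        (((PySem.List.pyRange 0 (v0.toList.length : Int)).map
            (fun i => (26 : Int) ^ ((v0.toList.length : Int) - i).toNat)).zip vote.toList).foldl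
          (fun d wc => d.modify wc.2 0 (fun v => v + wc.1)) d)
        (v0.toList.foldl (fun d k => d.insert k 0) PySem.Dict.empty) := by
      apply PySem.List.foldl_congr_mem
      intro acc vote hv
      exact pvInner_eq v0.toList.length vote.toList (by simpa using (hall vote hv).1) acc
    rw [hd]
    exact congrArg String.ofList (pvSel_eq _ (pvKeys_nodup v0.toList (v0 :: t) _))
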